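-- pv_equiv track=rewrite | github.com/Linchin/python_leetcode_git | uber20200204/Q1.py | evenSubarray
-- ===== SOURCE A (Python) =====
-- def evenSubarray(numbers, k):
--
--     # save all tuples that qualify in a dict
--
--     qualified = {}
--
--     for i in range(0, len(numbers)):
--         for j in range(i+1, len(numbers)+1):
--             temp = numbers[i:j]
--             temp_t = tuple(numbers[i:j])
--             odd = [item % 2 for item in temp]
--             if sum(odd) <= k and temp_t not in qualified:
--                 qualified[temp_t] = 1
--
--     return len(qualified)
-- ===== SOURCE B (Python) =====
-- def evenSubarray(numbers, k):
--     # One pass per start: running odd-count, early break, set dedup (no re-slicing sums).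
--     seen = set()
--     n = len(numbers)
--     for i in range(n):
--         odd = 0
--         sub = ()
--         for j in range(i, n):
--             x = numbers[j]
--             if x % 2 != 0:
--                 odd += 1
--             if odd > k:
--                 break
--             sub = sub + (x,)
--             seen.add(sub)
--     return len(seen)
-- ===== Notes on version B (the rewrite author's own statement) =====
-- stated objective: faster
-- what changed: Replaces the re-slice-and-resum over all (i,j) pairs plus dict membership by a per-start running odd-count with early break, extending the subarray incrementally and deduplicating in a set.
import Mathlib
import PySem

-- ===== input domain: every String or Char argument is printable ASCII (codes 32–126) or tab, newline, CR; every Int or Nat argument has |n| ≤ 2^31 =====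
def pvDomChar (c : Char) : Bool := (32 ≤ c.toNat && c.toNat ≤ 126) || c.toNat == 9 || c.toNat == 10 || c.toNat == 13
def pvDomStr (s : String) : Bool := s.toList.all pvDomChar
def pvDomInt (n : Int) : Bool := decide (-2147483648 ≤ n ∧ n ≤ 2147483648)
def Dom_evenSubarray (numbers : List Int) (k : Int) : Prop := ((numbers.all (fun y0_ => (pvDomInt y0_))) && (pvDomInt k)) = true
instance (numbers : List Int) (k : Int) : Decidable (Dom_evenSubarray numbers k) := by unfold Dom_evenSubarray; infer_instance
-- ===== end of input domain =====

-- B replaces A's re-slice-and-resum over all (i,j) pairs by a per-start running odd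
-- count with early break, extending each subarray incrementally (objective: faster).

-- ===== PORT A =====
def evenSubarray (numbers : List Int) (k : Int) : Int :=
  let qualified :=
    (PySem.List.pyRange 0 (numbers.length : Int) 1).foldl (fun q i =>
      (PySem.List.pyRange (i + 1) ((numbers.length : Int) + 1) 1).foldl (fun q j =>
        let temp := PySem.List.slice numbers (some i) (some j)
        let temp_t := temp
        let odd := temp.map (fun item => PySem.Int.mod item 2)
        if odd.sum ≤ k ∧ q.contains temp_t = false then q.insert temp_t 1 else q) q)
      (PySem.Dict.empty : PySem.Dict (List Int) Int)
  (qualified.size : Int)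

-- ===== PORT B =====
def pvInnerB (k : Int) (seen : PySem.Set (List Int)) (sub : List Int) (odd : Int) :
    List Int → PySem.Set (List Int)
  | [] => seen
  | x :: rest =>
    let odd' := if PySem.Int.mod x 2 ≠ 0 then odd + 1 else odd
    if k < odd' then seen
    else
      let sub' := sub ++ [x]
      pvInnerB k (PySem.Set.add seen sub') sub' odd' rest

def pvOuterB (k : Int) (seen : PySem.Set (List Int)) :
    List Int → PySem.Set (List Int)
  | [] => seen
  | x :: t => pvOuterB k (pvInnerB k seen [] 0 (x :: t)) t

def evenSubarray_alt (numbers : List Int) (k : Int) : Int :=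
  ((pvOuterB k PySem.Set.empty numbers).length : Int)

-- ===== PRECONDITION & SPEC =====
def Spec_evenSubarray (numbers : List Int) (k : Int) (out : Int) : Prop := out = evenSubarray_alt numbers k
instance (numbers : List Int) (k : Int) (out : Int) : Decidable (Spec_evenSubarray numbers k out) := by unfold Spec_evenSubarray; infer_instance

-- ===== CLAIM (what is proved, stated in full; the proofs are below) =====
def Claim_equal_evenSubarray : Prop := ∀ (numbers : List Int) (k : Int), Dom_evenSubarray numbers k → Spec_evenSubarray numbers k (evenSubarray numbers k)

-- ===== LEMMAS AND PROOFS =====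

-- sum of item % 2 over a list (A's odd-count)
def pvOddsum (l : List Int) : Int := (l.map (fun item => PySem.Int.mod item 2)).sum

-- A's inner-loop step on a given key
def pvAStep (k : Int) (q : PySem.Dict (List Int) Int) (key : List Int) : PySem.Dict (List Int) Int :=
  if pvOddsum key ≤ k ∧ q.contains key = false then q.insert key 1 else q

-- A's inner loop, re-expressed as structural recursion on the remaining elements
def pvAIn (k : Int) (sub : List Int) (q : PySem.Dict (List Int) Int) :
    List Int → PySem.Dict (List Int) Int
  | [] => q
  | x :: r => pvAIn k (sub ++ [x]) (pvAStep k q (sub ++ [x])) r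

-- A's outer loop over suffixes
def pvAOut (k : Int) (q : PySem.Dict (List Int) Int) :
    List Int → PySem.Dict (List Int) Int
  | [] => q
  | x :: t => pvAOut k (pvAIn k [] q (x :: t)) t

theorem pvMod2_bounds (x : Int) : 0 ≤ PySem.Int.mod x 2 ∧ PySem.Int.mod x 2 < 2 :=
  ⟨PySem.Int.mod_nonneg x (by omega), PySem.Int.mod_lt x (by omega)⟩

theorem pvOddsum_append (s : List Int) (x : Int) :
    pvOddsum (s ++ [x]) = pvOddsum s + PySem.Int.mod x 2 := by
  simp [pvOddsum]

theorem pvAIn_dead (k : Int) (r : List Int) : ∀ (sub : List Int) (q : PySem.Dict (List Int) Int),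
    k < pvOddsum sub → pvAIn k sub q r = q := by
  induction r with
  | nil => intro sub q _; rfl
  | cons x r ih =>
    intro sub q h
    have hm := pvMod2_bounds x
    have hgt : k < pvOddsum (sub ++ [x]) := by rw [pvOddsum_append]; omega
    have hstep : pvAStep k q (sub ++ [x]) = q := by
      unfold pvAStep
      rw [if_neg]; intro ⟨h1, _⟩; omega
    rw [pvAIn, hstep, ih _ _ hgt]

theorem pvInner_keys (k : Int) (r : List Int) :
    ∀ (sub : List Int) (q : PySem.Dict (List Int) Int) (s : PySem.Set (List Int)),
    q.keys = s → (pvAIn k sub q r).keys = pvInnerB k s sub (pvOddsum sub) r := by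
  induction r with
  | nil => intro sub q s h; simpa [pvAIn, pvInnerB] using h
  | cons x r ih =>
    intro sub q s h
    have hm := pvMod2_bounds x
    have hodd : (if PySem.Int.mod x 2 ≠ 0 then pvOddsum sub + 1 else pvOddsum sub)
        = pvOddsum (sub ++ [x]) := by
      rw [pvOddsum_append]; split_ifs with h0 <;> omega
    rw [pvAIn, pvInnerB, hodd]
    by_cases hk : k < pvOddsum (sub ++ [x])
    · rw [if_pos hk]
      have hstep : pvAStep k q (sub ++ [x]) = q := by
        unfold pvAStep; rw [if_neg]; intro ⟨h1, _⟩; omega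
      rw [hstep, pvAIn_dead k r _ _ hk, h]
    · rw [if_neg hk]
      by_cases hmem : (sub ++ [x]) ∈ q.keys
      · have hc : q.contains (sub ++ [x]) = true := by
          rw [PySem.Dict.contains_iff_mem_keys]; exact hmem
        have hstep : pvAStep k q (sub ++ [x]) = q := by
          unfold pvAStep; rw [if_neg]; intro ⟨_, h2⟩; rw [hc] at h2; exact absurd h2 (by simp)
        have hadd : PySem.Set.add s (sub ++ [x]) = s :=
          PySem.Set.add_of_mem (h ▸ hmem)
        rw [hstep]
        show (pvAIn k (sub ++ [x]) q r).keys
            = pvInnerB k (PySem.Set.add s (sub ++ [x])) (sub ++ [x]) (pvOddsum (sub ++ [x])) r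
        rw [hadd]
        exact ih _ _ _ h
      · have hc : q.contains (sub ++ [x]) = false := by
          rw [← Bool.not_eq_true, PySem.Dict.contains_iff_mem_keys]; exact hmem
        have hstep : pvAStep k q (sub ++ [x]) = q.insert (sub ++ [x]) 1 := by
          unfold pvAStep; rw [if_pos ⟨by omega, hc⟩]
        have hkeys : (q.insert (sub ++ [x]) 1).keys = s ++ [sub ++ [x]] := by
          rw [PySem.Dict.keys_insert_of_not_contains _ _ hc, h]
        have hadd : PySem.Set.add s (sub ++ [x]) = s ++ [sub ++ [x]] :=
          PySem.Set.add_of_not_mem (h ▸ hmem)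
        rw [hstep]
        show (pvAIn k (sub ++ [x]) (q.insert (sub ++ [x]) 1) r).keys
            = pvInnerB k (PySem.Set.add s (sub ++ [x])) (sub ++ [x]) (pvOddsum (sub ++ [x])) r
        rw [hadd]
        exact ih _ _ _ hkeys

theorem pvOuter_keys (k : Int) (u : List Int) :
    ∀ (q : PySem.Dict (List Int) Int) (s : PySem.Set (List Int)),
    q.keys = s → (pvAOut k q u).keys = pvOuterB k s u := by
  induction u with
  | nil => intro q s h; simpa [pvAOut, pvOuterB] using h
  | cons x t ih =>
    intro q s h
    rw [pvAOut, pvOuterB]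
    exact ih _ _ (by simpa [pvOddsum] using pvInner_keys k (x :: t) [] q s h)

-- range-fold over prefixes = structural recursion carrying the prefix
theorem pvRangePrefix (k : Int) (t : List Int) :
    ∀ (sub : List Int) (q : PySem.Dict (List Int) Int),
    (List.range t.length).foldl (fun q m => pvAStep k q (sub ++ t.take (m + 1))) q
      = pvAIn k sub q t := by
  induction t with
  | nil => intro sub q; rfl
  | cons x r ih =>
    intro sub q
    rw [List.length_cons, List.range_succ_eq_map, List.foldl_cons, List.foldl_map]
    have hbody : (fun (q : PySem.Dict (List Int) Int) (m : Nat) =>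
        pvAStep k q (sub ++ (x :: r).take (m.succ + 1)))
        = fun q m => pvAStep k q ((sub ++ [x]) ++ r.take (m + 1)) := by
      funext q m
      rw [List.take_succ_cons, List.append_cons]
    rw [show (sub ++ (x :: r).take (0 + 1)) = sub ++ [x] by simp]
    rw [hbody, ih]
    rfl

-- fold over drops = outer structural recursion
theorem pvDrops (k : Int) (u : List Int) :
    ∀ (q : PySem.Dict (List Int) Int),
    (List.range u.length).foldl (fun q ki => pvAIn k [] q (u.drop ki)) q = pvAOut k q u := by
  induction u with
  | nil => intro q; rfl
  | cons x t ih =>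
    intro q
    rw [List.length_cons, List.range_succ_eq_map, List.foldl_cons, List.foldl_map]
    have hbody : (fun (q : PySem.Dict (List Int) Int) (ki : Nat) =>
        pvAIn k [] q ((x :: t).drop ki.succ)) = fun q ki => pvAIn k [] q (t.drop ki) := by
      funext q ki; rfl
    rw [hbody, ih]
    rfl

theorem pvInnerFold (k : Int) (numbers : List Int) (ki : Nat) (hki : ki ≤ numbers.length)
    (q : PySem.Dict (List Int) Int) :
    (PySem.List.pyRange ((ki : Int) + 1) ((numbers.length : Int) + 1) 1).foldl
        (fun q j => pvAStep k q (PySem.List.slice numbers (some (ki : Int)) (some j))) q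
      = pvAIn k [] q (numbers.drop ki) := by
  rw [PySem.List.pyRange_one, List.foldl_map]
  have hcnt : (((numbers.length : Int) + 1) - ((ki : Int) + 1)).toNat
      = (numbers.drop ki).length := by
    rw [List.length_drop]; omega
  rw [hcnt]
  have hbody : (fun (q : PySem.Dict (List Int) Int) (m : Nat) =>
      pvAStep k q (PySem.List.slice numbers (some (ki : Int)) (some ((ki : Int) + 1 + (m : Int)))))
      = fun q m => pvAStep k q ([] ++ (numbers.drop ki).take (m + 1)) := by
    funext q m
    have hc : ((ki : Int) + 1 + (m : Int)) = ((ki : Int) + ((m + 1 : Nat) : Int)) := by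
      push_cast; ring
    rw [hc, PySem.List.slice_natCast_add, List.nil_append]
  rw [hbody, pvRangePrefix]

theorem pvA_eq_aOut (numbers : List Int) (k : Int) :
    evenSubarray numbers k
      = ((pvAOut k PySem.Dict.empty numbers).size : Int) := by
  show (((PySem.List.pyRange 0 (numbers.length : Int) 1).foldl (fun q i =>
      (PySem.List.pyRange (i + 1) ((numbers.length : Int) + 1) 1).foldl
        (fun q j => pvAStep k q (PySem.List.slice numbers (some i) (some j))) q)
      (PySem.Dict.empty : PySem.Dict (List Int) Int)).size : Int)
    = ((pvAOut k PySem.Dict.empty numbers).size : Int)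
  rw [← pvDrops k numbers PySem.Dict.empty]
  rw [PySem.List.pyRange_one, List.foldl_map]
  congr 2
  apply PySem.List.foldl_congr_mem
  intro q ki hmem
  rw [List.mem_range] at hmem
  have h0 : ((0 : Int) + (ki : Int)) = (ki : Int) := by ring
  rw [h0, pvInnerFold k numbers ki (by omega) q]

-- ===== VERDICT (by name: the statement is the Claim_ definition above) =====
theorem evenSubarray_spec : Claim_equal_evenSubarray := by
  intro numbers k _
  unfold Spec_evenSubarray
  rw [pvA_eq_aOut]
  have hkeys : (pvAOut k PySem.Dict.empty numbers).keys = pvOuterB k PySem.Set.empty numbers :=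
    pvOuter_keys k numbers PySem.Dict.empty PySem.Set.empty (by rfl)
  have hsz : (pvAOut k PySem.Dict.empty numbers).size
      = (pvAOut k PySem.Dict.empty numbers).keys.length := by
    simp [PySem.Dict.size, PySem.Dict.keys]
  rw [evenSubarray_alt, hsz, hkeys]
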